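-- pv_equiv track=rewrite | github.com/JasonForJoy/IMN | Ecommerce/model/metrics.py | is_valid_query
-- ===== SOURCE A (Python) =====
-- def is_valid_query(v):
--     num_pos = 0
--     num_neg = 0
--     for aid, label, score in v:
--         if label  > 0:
--             num_pos += 1
--         else:
--             num_neg += 1
--     if num_pos > 0 and num_neg > 0:
--         return True
--     else:
--         return False
-- ===== SOURCE B (Python) =====
-- def is_valid_query(v):
--     return any(label > 0 for aid, label, score in v) and any(not (label > 0) for aid, label, score in v)
-- ===== Notes on version B (the rewrite author's own statement) =====
-- stated objective: idiomatic
-- what changed: Replaced the single counting loop (two counters, final comparison) with two independent short-circuiting existence scans using any(); no counts are maintained.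
import Mathlib
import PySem

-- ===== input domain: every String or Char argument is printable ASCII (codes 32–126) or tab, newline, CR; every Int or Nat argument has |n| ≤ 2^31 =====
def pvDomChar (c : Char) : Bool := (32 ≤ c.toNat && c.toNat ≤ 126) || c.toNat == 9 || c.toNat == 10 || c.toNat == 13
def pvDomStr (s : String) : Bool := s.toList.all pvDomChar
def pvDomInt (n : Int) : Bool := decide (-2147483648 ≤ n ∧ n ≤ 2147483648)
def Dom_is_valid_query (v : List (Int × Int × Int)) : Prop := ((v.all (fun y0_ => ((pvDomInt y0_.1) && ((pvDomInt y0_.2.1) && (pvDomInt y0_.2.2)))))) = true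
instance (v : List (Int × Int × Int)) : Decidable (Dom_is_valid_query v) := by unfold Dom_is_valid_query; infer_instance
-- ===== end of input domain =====

-- B replaces A's counting loop with two short-circuiting existence scans (idiomatic; same behaviour).

-- ===== PORT A =====
-- A: one pass maintaining num_pos and num_neg, then compare both with 0.
def is_valid_query (v : List (Int × Int × Int)) : Bool :=
  let st := v.foldl (fun (p : Int × Int) t =>
    if t.2.1 > 0 then (p.1 + 1, p.2) else (p.1, p.2 + 1)) (0, 0)
  if st.1 > 0 ∧ st.2 > 0 then true else false

-- ===== PORT B =====
-- B: any positive label AND any non-positive label (short-circuiting scans).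
def is_valid_query_alt (v : List (Int × Int × Int)) : Bool :=
  (v.any fun t => decide (t.2.1 > 0)) && (v.any fun t => ! decide (t.2.1 > 0))

-- ===== PRECONDITION & SPEC =====
def Spec_is_valid_query (v : List (Int × Int × Int)) (out : Bool) : Prop := out = is_valid_query_alt v
instance (v : List (Int × Int × Int)) (out : Bool) : Decidable (Spec_is_valid_query v out) := by unfold Spec_is_valid_query; infer_instance

-- ===== CLAIM (what is proved, stated in full; the proofs are below) =====
def Claim_equal_is_valid_query : Prop := ∀ (v : List (Int × Int × Int)), Dom_is_valid_query v → Spec_is_valid_query v (is_valid_query v)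

-- ===== LEMMAS AND PROOFS =====

-- A's fold, started from any accumulator, computes the start plus the two partition counts.
theorem pv_fold_counts (v : List (Int × Int × Int)) (a b : Int) :
    v.foldl (fun (p : Int × Int) t =>
      if t.2.1 > 0 then (p.1 + 1, p.2) else (p.1, p.2 + 1)) (a, b)
    = (a + (v.countP fun t => decide (t.2.1 > 0)),
       b + (v.countP fun t => ! decide (t.2.1 > 0))) := by
  induction v generalizing a b with
  | nil => simp
  | cons h t ih =>
    by_cases hp : h.2.1 > 0 <;>
      simp [List.foldl, hp, ih] <;> ring

theorem pv_countP_pos_iff_any (v : List (Int × Int × Int)) (f : (Int × Int × Int) → Bool) :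
    (0 < (v.countP f : Int)) ↔ v.any f = true := by
  rw [List.any_eq_true]
  constructor
  · intro h
    have h' : 0 < v.countP f := by exact_mod_cast h
    exact List.countP_pos_iff.mp h'
  · intro h
    exact_mod_cast List.countP_pos_iff.mpr h

-- ===== VERDICT (by name: the statement is the Claim_ definition above) =====
theorem is_valid_query_spec : Claim_equal_is_valid_query := by
  intro v _
  unfold Spec_is_valid_query is_valid_query is_valid_query_alt
  rw [pv_fold_counts]
  simp only [zero_add, gt_iff_lt]
  rw [if_congr (and_congr (pv_countP_pos_iff_any v _) (pv_countP_pos_iff_any v _)) rfl rfl]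
  by_cases h1 : v.any (fun t => decide (t.2.1 > 0)) = true <;>
  by_cases h2 : v.any (fun t => ! decide (t.2.1 > 0)) = true <;>
    simp [h1, h2]
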